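-- pv_equiv track=rewrite | github.com/gabriellaec/desoft-analise-exercicios | backup/user_400/ch51_2019_04_27_02_40_26_397769.py | estritamente_crescente
-- ===== SOURCE A (Python) =====
-- def estritamente_crescente(x):
--     i = 1
--     while i < len(x):
--         if x[i] <= x[i-1]:
--             del x[i]
--         else:
--             i += 1
--     return x
-- ===== SOURCE B (Python) =====
-- def estritamente_crescente(x):
--     out = []
--     for v in x:
--         if not out or v > out[-1]:
--             out.append(v)
--     return out
-- ===== Notes on version B (the rewrite author's own statement) =====
-- stated objective: faster
-- what changed: Replaces the quadratic in-place deletion loop (each 'del x[i]' shifts the tail) with a single pass that builds a fresh list, appending each element strictly greater than the last kept one.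
import Mathlib
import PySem

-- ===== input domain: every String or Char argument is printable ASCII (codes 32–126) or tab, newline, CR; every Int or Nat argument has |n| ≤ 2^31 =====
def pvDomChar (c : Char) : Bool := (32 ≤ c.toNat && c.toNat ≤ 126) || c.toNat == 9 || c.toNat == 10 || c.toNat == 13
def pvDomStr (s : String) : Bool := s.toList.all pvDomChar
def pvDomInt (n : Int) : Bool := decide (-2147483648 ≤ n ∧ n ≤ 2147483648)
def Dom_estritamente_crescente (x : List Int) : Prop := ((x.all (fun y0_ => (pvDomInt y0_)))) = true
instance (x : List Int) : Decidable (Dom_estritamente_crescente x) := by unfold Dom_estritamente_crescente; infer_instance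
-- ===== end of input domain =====

-- B replaces A's quadratic in-place deletion loop with a linear single pass building a
-- fresh list; A mutates its argument in place, the equivalence proved is about the
-- return value only.

-- ===== PORT A =====
-- A's while loop: index i, delete x[i] when x[i] <= x[i-1], else advance.
-- Indices are in range under the guard, so getD is exact here.
def pvALoop (x : List Int) (i : Nat) : List Int :=
  if h : i < x.length then
    if x.getD i 0 ≤ x.getD (i-1) 0 then
      pvALoop (x.eraseIdx i) i
    else
      pvALoop x (i+1)
  else x
termination_by x.length - i
decreasing_by
  · simp [List.length_eraseIdx, h]; omega
  · omega

def estritamente_crescente (x : List Int) : List Int := pvALoop x 1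

-- ===== PORT B =====
-- Source B: for v in x: append v when out is empty or v > out[-1].
def estritamente_crescente_alt (x : List Int) : List Int :=
  x.foldl (fun out v =>
    if (match out.getLast? with | none => true | some l => decide (l < v)) then
      out ++ [v]
    else out) []

-- ===== PRECONDITION & SPEC =====
def Spec_estritamente_crescente (x : List Int) (out : List Int) : Prop := out = estritamente_crescente_alt x
instance (x : List Int) (out : List Int) : Decidable (Spec_estritamente_crescente x out) := by unfold Spec_estritamente_crescente; infer_instance

-- ===== CLAIM (what is proved, stated in full; the proofs are below) =====
def Claim_equal_estritamente_crescente : Prop := ∀ (x : List Int), Dom_estritamente_crescente x → Spec_estritamente_crescente x (estritamente_crescente x)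

-- ===== LEMMAS AND PROOFS =====

-- Common characterisation: keep every element strictly greater than the last kept one.
def pvKeep : Int → List Int → List Int
  | _, [] => []
  | last, v :: t => if last < v then v :: pvKeep v t else pvKeep last t

theorem pvKeep_cons_lt (last v : Int) (t : List Int) (h : last < v) :
    pvKeep last (v :: t) = v :: pvKeep v t := by simp [pvKeep, h]

theorem pvKeep_cons_not_lt (last v : Int) (t : List Int) (h : ¬ last < v) :
    pvKeep last (v :: t) = pvKeep last t := by simp [pvKeep, h]

theorem pvALoop_eq (x : List Int) (i : Nat) (h1 : 1 ≤ i) :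
    pvALoop x i = x.take i ++ pvKeep (x.getD (i-1) 0) (x.drop i) := by
  rw [pvALoop]
  split
  · rename_i h
    have hdrop : x.drop i = x.getD i 0 :: x.drop (i+1) := by
      rw [List.getD_eq_getElem x 0 h, List.drop_eq_getElem_cons h]
    split
    · rename_i hle
      rw [pvALoop_eq (x.eraseIdx i) i h1]
      have he : x.eraseIdx i = x.take i ++ x.drop (i+1) := List.eraseIdx_eq_take_drop_succ x i
      have hlen : (x.take i).length = i := List.length_take_of_le (by omega)
      have ht : (x.eraseIdx i).take i = x.take i := by
        rw [he]; exact List.take_left' hlen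
      have hd : (x.eraseIdx i).drop i = x.drop (i+1) := by
        rw [he]; exact List.drop_left' hlen
      have hg : (x.eraseIdx i).getD (i-1) 0 = x.getD (i-1) 0 := by
        rw [he]
        rw [List.getD_eq_getElem?_getD, List.getD_eq_getElem?_getD,
            List.getElem?_append_left (by omega), List.getElem?_take_of_lt (by omega)]
      rw [ht, hd, hg, hdrop, pvKeep_cons_not_lt _ _ _ (by omega)]
    · rename_i hgt
      rw [pvALoop_eq x (i+1) (by omega)]
      have hts : x.take (i+1) = x.take i ++ [x.getD i 0] := by
        rw [List.getD_eq_getElem x 0 h, List.take_add_one, List.getElem?_eq_getElem h]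
        simp
      have hg : x.getD ((i+1)-1) 0 = x.getD i 0 := by simp
      rw [hts, hg, hdrop, pvKeep_cons_lt _ _ _ (by omega), List.append_assoc]
      rfl
  · rename_i h
    rw [List.drop_eq_nil_of_le (by omega), List.take_of_length_le (by omega)]
    simp [pvKeep]
termination_by x.length - i
decreasing_by
  · omega
  · have hlt : i < x.length := by assumption
    have h2 : (x.eraseIdx i).length = x.length - 1 := List.length_eraseIdx_of_lt hlt
    omega

theorem pvFoldl_eq (l : List Int) : ∀ (acc : List Int) (last : Int),
    acc.getLast? = some last →
    l.foldl (fun out v =>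
      if (match out.getLast? with | none => true | some l => decide (l < v)) then
        out ++ [v]
      else out) acc = acc ++ pvKeep last l := by
  induction l with
  | nil => intro acc last _; simp [pvKeep]
  | cons v t ih =>
    intro acc last hlast
    by_cases hv : last < v
    · have : acc.getLast? = some last := hlast
      simp only [List.foldl_cons, hlast, hv, decide_true, if_pos]
      rw [ih (acc ++ [v]) v (by simp)]
      simp [pvKeep, hv]
    · simp only [List.foldl_cons, hlast, hv, decide_false, if_neg, Bool.false_eq_true,
        not_false_eq_true]
      rw [ih acc last hlast]
      simp [pvKeep, hv]

theorem alt_eq (x : List Int) :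
    estritamente_crescente_alt x =
      match x with
      | [] => []
      | h :: t => h :: pvKeep h t := by
  match x with
  | [] => rfl
  | h :: t =>
    unfold estritamente_crescente_alt
    simp only [List.foldl_cons, List.getLast?_nil, List.nil_append, if_pos]
    exact pvFoldl_eq t [h] h (by simp)

-- ===== VERDICT (by name: the statement is the Claim_ definition above) =====
theorem estritamente_crescente_spec : Claim_equal_estritamente_crescente := by
  intro x _
  unfold Spec_estritamente_crescente
  rw [alt_eq]
  unfold estritamente_crescente
  rw [pvALoop_eq x 1 (le_refl 1)]
  match x with
  | [] => rfl
  | h :: t => simp
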